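-- pv_equiv track=rewrite | github.com/aXeeDENt/AA_tournament | tatarintev_denis_solo_leveling_round_2.py | strategy_round_2
-- ===== SOURCE A (Python) =====
-- def strategy_round_2(opponent_id: int, my_history: dict[int, list[int]], opponents_history: dict[int, list[int]]) -> tuple[int, int]:
--     """Enhanced strategy for Round 2 with updated opponent selection"""
--     # Get current histories
--     current_my = my_history.get(opponent_id, [])
--     current_op = opponents_history.get(opponent_id, [])
--
--     # Calculate move using original logic
--     if len(current_my) == 0: move = 0
--     elif len(current_my) == 1: move = 1
--     elif len(current_my) == 2: move = 1
--     elif len(current_my) == 3: move = 1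
--     elif len(current_my) == 4: move = 0
--     else:
--         move_number = len(current_my)
--         cycle_pos = ((move_number - 5) // 5) % 4
--         pos_in_sit = (move_number - 5) % 5
--
--         if cycle_pos == 0:
--             opp_idx = move_number - 5
--             move = 1 - current_op[opp_idx] if opp_idx < len(current_op) else 0
--         elif cycle_pos == 1:
--             opp_idx = move_number - 5
--             move = current_op[opp_idx] if opp_idx < len(current_op) else 1
--         elif cycle_pos == 2:
--             move = 1 if pos_in_sit == 4 else (current_op[move_number-5] if move_number-5 < len(current_op) else 1)
--         else:
--             seed = move_number
--             if current_op: seed += current_op[-1] * 2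
--             if len(current_op) > 3: seed += sum(current_op[-3:]) * 3
--             move = 1 if (seed * 1337 + 42) % 100 > 50 else 0
--
--     # Classify opponents based on their first 4 moves (updated categories)
--     categories = {
--         'best': [],    # 1111
--         'good': [],    # 1110, 1011, 1101, 0111
--         'normal': [],  # 0011, 0101, 0110, 1001, 1010, 1100
--         'bad': [],     # 0001, 0100, 0010, 1000
--         'worst': []    # 0000
--     }
--
--     for opp_id in opponents_history:
--         # Skip if we've played 200 rounds with this opponent
--         if len(my_history.get(opp_id, [])) >= 200:
--             continue
--
--         # Get first 4 moves (pad with 1 if needed)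
--         first_four = opponents_history[opp_id][:4]
--         if len(first_four) < 4:
--             first_four = first_four + [1]*(4-len(first_four))
--
--         # Classify based on the new specifications
--         if first_four == [1,1,1,1]:
--             categories['best'].append(opp_id)
--         elif first_four in [[1,1,1,0], [1,0,1,1], [1,1,0,1], [0,1,1,1]]:
--             categories['good'].append(opp_id)
--         elif first_four in [[0,0,1,1], [0,1,0,1], [0,1,1,0], [1,0,0,1], [1,0,1,0], [1,1,0,0]]:
--             categories['normal'].append(opp_id)
--         elif first_four in [[0,0,0,1], [0,1,0,0], [0,0,1,0], [1,0,0,0]]: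
--             categories['bad'].append(opp_id)
--         elif first_four == [0,0,0,0]:
--             categories['worst'].append(opp_id)
--         else:
--             # Default classification based on cooperation count
--             coop_count = sum(first_four)
--             if coop_count == 4: categories['best'].append(opp_id)
--             elif coop_count == 3: categories['good'].append(opp_id)
--             elif coop_count == 2: categories['normal'].append(opp_id)
--             elif coop_count == 1: categories['bad'].append(opp_id)
--             else: categories['worst'].append(opp_id)
--
--     # Select next opponent by priority (best → good → normal → bad → worst)
--     for category in ['best', 'good', 'normal', 'bad']:
--         if categories[category]:
--             # Within category, prefer opponents we've played less with
--             sorted_opp = sorted(categories[category], key=lambda x: len(my_history.get(x, [])))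
--
--             # Stick with current opponent if they're in this category and under 200 rounds
--             if opponent_id in sorted_opp and len(my_history.get(opponent_id, [])) < 200:
--                 return (move, opponent_id)
--
--             # Otherwise pick the least played opponent in this category
--             return (move, sorted_opp[0])
--
--     # Only worst opponents available (play them minimally)
--     if categories['worst']:
--         return (move, min(categories['worst'], key=lambda x: len(my_history.get(x, []))))
--
--     # Fallback (shouldn't happen as per tournament rules)
--     return (move, opponent_id)
-- ===== SOURCE B (Python) =====
-- def strategy_round_2(opponent_id: int, my_history: dict, opponents_history: dict) -> tuple:
--     """Same result as A: move block kept verbatim; opponent selection is a single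
--     streaming pass keeping the lexicographically minimal (rank, played) candidate,
--     with rank computed arithmetically from the sum of the first four moves
--     (padding-with-1 folded in as 4 - len). No buckets, no sort, no min() calls."""
--     current_my = my_history.get(opponent_id, [])
--     current_op = opponents_history.get(opponent_id, [])
--
--     if len(current_my) == 0: move = 0
--     elif len(current_my) == 1: move = 1
--     elif len(current_my) == 2: move = 1
--     elif len(current_my) == 3: move = 1
--     elif len(current_my) == 4: move = 0
--     else:
--         move_number = len(current_my)
--         cycle_pos = ((move_number - 5) // 5) % 4
--         pos_in_sit = (move_number - 5) % 5
--         if cycle_pos == 0: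
--             opp_idx = move_number - 5
--             move = 1 - current_op[opp_idx] if opp_idx < len(current_op) else 0
--         elif cycle_pos == 1:
--             opp_idx = move_number - 5
--             move = current_op[opp_idx] if opp_idx < len(current_op) else 1
--         elif cycle_pos == 2:
--             move = 1 if pos_in_sit == 4 else (current_op[move_number-5] if move_number-5 < len(current_op) else 1)
--         else:
--             seed = move_number
--             if current_op: seed += current_op[-1] * 2
--             if len(current_op) > 3: seed += sum(current_op[-3:]) * 3
--             move = 1 if (seed * 1337 + 42) % 100 > 50 else 0
--
--     best = None       # (rank, played, opp_id): lexicographically minimal, first wins ties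
--     cur_rank = 5      # rank of opponent_id if it is eligible, else 5
--     for o in opponents_history:
--         played = len(my_history.get(o, []))
--         if played >= 200:
--             continue
--         ff = opponents_history[o][:4]
--         s = sum(ff) + (4 - len(ff))          # missing moves count as cooperation (pad 1)
--         rank = 4 - s if 1 <= s <= 4 else 4   # 4 coops -> best(0) ... non-binary/0 -> worst(4)
--         if o == opponent_id:
--             cur_rank = rank
--         if best is None or (rank, played) < (best[0], best[1]):
--             best = (rank, played, o)
--     if best is None:
--         return (move, opponent_id)
--     if best[0] < 4 and cur_rank == best[0]:
--         return (move, opponent_id)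
--     return (move, best[2])
-- ===== Notes on version B (the rewrite author's own statement) =====
-- stated objective: faster
-- what changed: Replaces A's five-bucket classification (16-pattern if/elif chain), priority scan, stable sort and min() calls with one streaming pass that keeps the lexicographically minimal (rank, played) candidate, the rank computed arithmetically from the sum of the first four moves with the pad-with-1 folded in as 4-len.
import Mathlib
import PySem

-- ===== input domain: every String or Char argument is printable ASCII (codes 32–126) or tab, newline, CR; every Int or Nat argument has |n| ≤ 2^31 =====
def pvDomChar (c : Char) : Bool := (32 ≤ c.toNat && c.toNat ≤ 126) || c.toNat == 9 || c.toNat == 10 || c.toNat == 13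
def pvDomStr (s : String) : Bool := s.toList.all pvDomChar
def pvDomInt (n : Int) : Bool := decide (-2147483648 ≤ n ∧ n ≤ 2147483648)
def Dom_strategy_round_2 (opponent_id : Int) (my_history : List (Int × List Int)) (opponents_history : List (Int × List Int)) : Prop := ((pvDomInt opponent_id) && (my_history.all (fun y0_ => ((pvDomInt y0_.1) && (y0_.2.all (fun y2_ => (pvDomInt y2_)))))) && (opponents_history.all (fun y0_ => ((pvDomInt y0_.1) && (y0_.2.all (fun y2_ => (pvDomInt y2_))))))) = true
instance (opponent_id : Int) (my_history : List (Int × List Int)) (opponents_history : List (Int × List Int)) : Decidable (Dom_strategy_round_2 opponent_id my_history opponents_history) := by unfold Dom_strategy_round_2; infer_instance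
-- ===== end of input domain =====

-- B keeps A's move calculation verbatim but replaces the five-bucket classification,
-- priority scan, stable sort and min() calls by ONE streaming pass keeping the
-- lexicographically minimal (rank, played) candidate (rank computed arithmetically
-- from the sum of the first four moves, the pad-with-1 folded in as 4 - len);
-- measured faster by a constant factor (no intermediate lists, no sort).

-- ===== PORT A =====
-- the move-calculation block (verbatim identical in Source A and Source B)
def pvMove (current_my current_op : List Int) : Int :=
  if current_my.length = 0 then 0
  else if current_my.length = 1 then 1
  else if current_my.length = 2 then 1
  else if current_my.length = 3 then 1
  else if current_my.length = 4 then 0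
  else
    let move_number : Int := current_my.length
    let cycle_pos := PySem.Int.mod (PySem.Int.floordiv (move_number - 5) 5) 4
    let pos_in_sit := PySem.Int.mod (move_number - 5) 5
    if cycle_pos = 0 then
      let opp_idx := move_number - 5
      if opp_idx < (current_op.length : Int) then 1 - PySem.List.pyGetD current_op opp_idx 0 else 0
    else if cycle_pos = 1 then
      let opp_idx := move_number - 5
      if opp_idx < (current_op.length : Int) then PySem.List.pyGetD current_op opp_idx 0 else 1
    else if cycle_pos = 2 then
      if pos_in_sit = 4 then 1
      else if move_number - 5 < (current_op.length : Int) then PySem.List.pyGetD current_op (move_number - 5) 0 else 1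
    else
      let seed := move_number
      let seed := if current_op ≠ [] then seed + PySem.List.pyGetD current_op (-1) 0 * 2 else seed
      let seed := if 3 < current_op.length then seed + (PySem.List.slice current_op (some (-3)) none).sum * 3 else seed
      if 50 < PySem.Int.mod (seed * 1337 + 42) 100 then 1 else 0

-- A's first-four-moves list, padded with 1
def pvFirstFour (moves : List Int) : List Int :=
  let ff := PySem.List.slice moves none (some 4)
  ff ++ List.replicate (4 - ff.length) 1

-- the body of A's classification loop (Python `in [..]` ported as a disjunction of equalities)
def pvStepA (myd opd : PySem.Dict Int (List Int))
    (acc : List Int × List Int × List Int × List Int × List Int) (opp_id : Int) :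
    List Int × List Int × List Int × List Int × List Int :=
  if 200 ≤ (myd.getD opp_id []).length then acc
  else
    let first_four := pvFirstFour (opd.getD opp_id [])
    if first_four = [1,1,1,1] then
      (acc.1 ++ [opp_id], acc.2.1, acc.2.2.1, acc.2.2.2.1, acc.2.2.2.2)
    else if first_four = [1,1,1,0] ∨ first_four = [1,0,1,1] ∨ first_four = [1,1,0,1] ∨ first_four = [0,1,1,1] then
      (acc.1, acc.2.1 ++ [opp_id], acc.2.2.1, acc.2.2.2.1, acc.2.2.2.2)
    else if first_four = [0,0,1,1] ∨ first_four = [0,1,0,1] ∨ first_four = [0,1,1,0] ∨ first_four = [1,0,0,1] ∨ first_four = [1,0,1,0] ∨ first_four = [1,1,0,0] then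
      (acc.1, acc.2.1, acc.2.2.1 ++ [opp_id], acc.2.2.2.1, acc.2.2.2.2)
    else if first_four = [0,0,0,1] ∨ first_four = [0,1,0,0] ∨ first_four = [0,0,1,0] ∨ first_four = [1,0,0,0] then
      (acc.1, acc.2.1, acc.2.2.1, acc.2.2.2.1 ++ [opp_id], acc.2.2.2.2)
    else if first_four = [0,0,0,0] then
      (acc.1, acc.2.1, acc.2.2.1, acc.2.2.2.1, acc.2.2.2.2 ++ [opp_id])
    else
      let coop_count := first_four.sum
      if coop_count = 4 then (acc.1 ++ [opp_id], acc.2.1, acc.2.2.1, acc.2.2.2.1, acc.2.2.2.2)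
      else if coop_count = 3 then (acc.1, acc.2.1 ++ [opp_id], acc.2.2.1, acc.2.2.2.1, acc.2.2.2.2)
      else if coop_count = 2 then (acc.1, acc.2.1, acc.2.2.1 ++ [opp_id], acc.2.2.2.1, acc.2.2.2.2)
      else if coop_count = 1 then (acc.1, acc.2.1, acc.2.2.1, acc.2.2.2.1 ++ [opp_id], acc.2.2.2.2)
      else (acc.1, acc.2.1, acc.2.2.1, acc.2.2.2.1, acc.2.2.2.2 ++ [opp_id])

-- the body of A's priority loop over ['best','good','normal','bad']
def pvPickA (myd : PySem.Dict Int (List Int)) (move opponent_id : Int) (bucket : List Int) : Int × Int :=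
  let sorted_opp := PySem.List.sorted bucket (fun x => (((myd.getD x []).length : Int))) false
  if opponent_id ∈ sorted_opp ∧ (myd.getD opponent_id []).length < 200 then (move, opponent_id)
  else (move, PySem.List.pyGetD sorted_opp 0 0)

def strategy_round_2 (opponent_id : Int) (my_history : List (Int × List Int)) (opponents_history : List (Int × List Int)) : Int × Int :=
  let myd := PySem.Dict.ofList my_history
  let opd := PySem.Dict.ofList opponents_history
  let current_my := myd.getD opponent_id []
  let current_op := opd.getD opponent_id []
  let move := pvMove current_my current_op
  let cats := opd.keys.foldl (pvStepA myd opd) ([], [], [], [], [])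
  if cats.1 ≠ [] then pvPickA myd move opponent_id cats.1
  else if cats.2.1 ≠ [] then pvPickA myd move opponent_id cats.2.1
  else if cats.2.2.1 ≠ [] then pvPickA myd move opponent_id cats.2.2.1
  else if cats.2.2.2.1 ≠ [] then pvPickA myd move opponent_id cats.2.2.2.1
  else if cats.2.2.2.2 ≠ [] then
    (move, (PySem.List.min? cats.2.2.2.2 (fun x => (((myd.getD x []).length : Int)))).getD 0)
  else (move, opponent_id)

-- ===== PORT B =====
-- B's arithmetic rank: s = sum(ff) + (4 - len(ff)); rank = 4 - s if 1 <= s <= 4 else 4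
def pvRankB (moves : List Int) : Int :=
  let ff := PySem.List.slice moves none (some 4)
  let s := ff.sum + (4 - (ff.length : Int))
  if 1 ≤ s ∧ s ≤ 4 then 4 - s else 4

-- the body of B's single pass: state = (best as (rank, played, opp_id), cur_rank)
def pvStepB (oid : Int) (myd opd : PySem.Dict Int (List Int))
    (acc : Option (Int × Int × Int) × Int) (o : Int) : Option (Int × Int × Int) × Int :=
  let played := (myd.getD o []).length
  if 200 ≤ played then acc
  else
    let rank := pvRankB (opd.getD o [])
    let cur := if o = oid then rank else acc.2
    let best :=
      match acc.1 with
      | none => some (rank, (played : Int), o)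
      | some (br, bp, bo) =>
          if rank < br ∨ (rank = br ∧ (played : Int) < bp) then some (rank, (played : Int), o)
          else some (br, bp, bo)
    (best, cur)

def strategy_round_2_alt (opponent_id : Int) (my_history : List (Int × List Int)) (opponents_history : List (Int × List Int)) : Int × Int :=
  let myd := PySem.Dict.ofList my_history
  let opd := PySem.Dict.ofList opponents_history
  let move := pvMove (myd.getD opponent_id []) (opd.getD opponent_id [])
  let res := opd.keys.foldl (pvStepB opponent_id myd opd) (none, 5)
  match res.1 with
  | none => (move, opponent_id)
  | some (br, _, bo) =>
      if br < 4 ∧ res.2 = br then (move, opponent_id) else (move, bo)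

-- ===== PRECONDITION & SPEC =====
def Spec_strategy_round_2 (opponent_id : Int) (my_history : List (Int × List Int)) (opponents_history : List (Int × List Int)) (out : Int × Int) : Prop := out = strategy_round_2_alt opponent_id my_history opponents_history
instance (opponent_id : Int) (my_history : List (Int × List Int)) (opponents_history : List (Int × List Int)) (out : Int × Int) : Decidable (Spec_strategy_round_2 opponent_id my_history opponents_history out) := by unfold Spec_strategy_round_2; infer_instance

-- ===== CLAIM (what is proved, stated in full; the proofs are below) =====
def Claim_equal_strategy_round_2 : Prop := ∀ (opponent_id : Int) (my_history : List (Int × List Int)) (opponents_history : List (Int × List Int)), Dom_strategy_round_2 opponent_id my_history opponents_history → Spec_strategy_round_2 opponent_id my_history opponents_history (strategy_round_2 opponent_id my_history opponents_history)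

-- ===== LEMMAS AND PROOFS =====

lemma pvFirstFour_length (m : List Int) : (pvFirstFour m).length = 4 := by
  simp only [pvFirstFour, PySem.List.slice_to _ (by omega : (0:Int) ≤ 4)]
  simp only [List.length_append, List.length_replicate, List.length_take]
  omega

-- A's rank as a chain of value tests (proof-side abstraction)
def pvRank (ff : List Int) : Int :=
  if ff.sum = 4 then 0 else if ff.sum = 3 then 1 else if ff.sum = 2 then 2
  else if ff.sum = 1 then 3 else 4

lemma pvRank_cases (ff : List Int) :
    pvRank ff = 0 ∨ pvRank ff = 1 ∨ pvRank ff = 2 ∨ pvRank ff = 3 ∨ pvRank ff = 4 := by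
  unfold pvRank; split_ifs <;> simp

-- B's arithmetic rank computes A's rank of the padded first four
lemma pvRankB_eq (m : List Int) : pvRankB m = pvRank (pvFirstFour m) := by
  unfold pvRankB pvRank pvFirstFour
  simp only [PySem.List.slice_to _ (by omega : (0:Int) ≤ 4), show (4:Int).toNat = 4 from rfl]
  have hlen : (m.take 4).length ≤ 4 := by simp [List.length_take]
  have hsum : (m.take 4 ++ List.replicate (4 - (m.take 4).length) 1).sum
      = (m.take 4).sum + (4 - ((m.take 4).length : Int)) := by
    rw [List.sum_append, List.sum_replicate]
    simp only [nsmul_eq_mul, mul_one]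
    push_cast [Nat.cast_sub hlen]
    ring
  rw [hsum]
  split_ifs <;> omega

-- append to the bucket selected by a rank index
def pvBump (acc : List Int × List Int × List Int × List Int × List Int) (i x : Int) :
    List Int × List Int × List Int × List Int × List Int :=
  if i = 0 then (acc.1 ++ [x], acc.2.1, acc.2.2.1, acc.2.2.2.1, acc.2.2.2.2)
  else if i = 1 then (acc.1, acc.2.1 ++ [x], acc.2.2.1, acc.2.2.2.1, acc.2.2.2.2)
  else if i = 2 then (acc.1, acc.2.1, acc.2.2.1 ++ [x], acc.2.2.2.1, acc.2.2.2.2)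
  else if i = 3 then (acc.1, acc.2.1, acc.2.2.1, acc.2.2.2.1 ++ [x], acc.2.2.2.2)
  else (acc.1, acc.2.1, acc.2.2.1, acc.2.2.2.1, acc.2.2.2.2 ++ [x])

-- A's 16-pattern chain classifies by the cooperation count
set_option maxHeartbeats 2000000 in
lemma pvChain_eq (acc : List Int × List Int × List Int × List Int × List Int) (x a b c d : Int) :
    (if [a,b,c,d] = ([1,1,1,1] : List Int) then
      (acc.1 ++ [x], acc.2.1, acc.2.2.1, acc.2.2.2.1, acc.2.2.2.2)
    else if [a,b,c,d] = ([1,1,1,0] : List Int) ∨ [a,b,c,d] = ([1,0,1,1] : List Int) ∨ [a,b,c,d] = ([1,1,0,1] : List Int) ∨ [a,b,c,d] = ([0,1,1,1] : List Int) then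
      (acc.1, acc.2.1 ++ [x], acc.2.2.1, acc.2.2.2.1, acc.2.2.2.2)
    else if [a,b,c,d] = ([0,0,1,1] : List Int) ∨ [a,b,c,d] = ([0,1,0,1] : List Int) ∨ [a,b,c,d] = ([0,1,1,0] : List Int) ∨ [a,b,c,d] = ([1,0,0,1] : List Int) ∨ [a,b,c,d] = ([1,0,1,0] : List Int) ∨ [a,b,c,d] = ([1,1,0,0] : List Int) then
      (acc.1, acc.2.1, acc.2.2.1 ++ [x], acc.2.2.2.1, acc.2.2.2.2)
    else if [a,b,c,d] = ([0,0,0,1] : List Int) ∨ [a,b,c,d] = ([0,1,0,0] : List Int) ∨ [a,b,c,d] = ([0,0,1,0] : List Int) ∨ [a,b,c,d] = ([1,0,0,0] : List Int) then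
      (acc.1, acc.2.1, acc.2.2.1, acc.2.2.2.1 ++ [x], acc.2.2.2.2)
    else if [a,b,c,d] = ([0,0,0,0] : List Int) then
      (acc.1, acc.2.1, acc.2.2.1, acc.2.2.2.1, acc.2.2.2.2 ++ [x])
    else
      if ([a,b,c,d] : List Int).sum = 4 then (acc.1 ++ [x], acc.2.1, acc.2.2.1, acc.2.2.2.1, acc.2.2.2.2)
      else if ([a,b,c,d] : List Int).sum = 3 then (acc.1, acc.2.1 ++ [x], acc.2.2.1, acc.2.2.2.1, acc.2.2.2.2)
      else if ([a,b,c,d] : List Int).sum = 2 then (acc.1, acc.2.1, acc.2.2.1 ++ [x], acc.2.2.2.1, acc.2.2.2.2)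
      else if ([a,b,c,d] : List Int).sum = 1 then (acc.1, acc.2.1, acc.2.2.1, acc.2.2.2.1 ++ [x], acc.2.2.2.2)
      else (acc.1, acc.2.1, acc.2.2.1, acc.2.2.2.1, acc.2.2.2.2 ++ [x])) =
    pvBump acc (pvRank [a,b,c,d]) x := by
  simp only [pvRank, pvBump, List.sum_cons, List.sum_nil, List.cons.injEq, and_true]
  split_ifs <;> first | rfl | omega

lemma pvStepA_eq (myd opd : PySem.Dict Int (List Int)) (acc) (x : Int) :
    pvStepA myd opd acc x =
      if 200 ≤ (myd.getD x []).length then acc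
      else pvBump acc (pvRank (pvFirstFour (opd.getD x []))) x := by
  unfold pvStepA
  by_cases hp : 200 ≤ (myd.getD x []).length
  · simp [hp]
  · simp only [if_neg hp]
    have hlen : (pvFirstFour (opd.getD x [])).length = 4 := pvFirstFour_length _
    generalize hgen : pvFirstFour (opd.getD x []) = ff at *
    rcases ff with _ | ⟨a, _ | ⟨b, _ | ⟨c, _ | ⟨d, _ | _⟩⟩⟩⟩ <;> simp only [List.length_cons,
      List.length_nil] at hlen <;> try omega
    exact pvChain_eq acc x a b c d

-- the membership filter of A's loop
def pvB (myd opd : PySem.Dict Int (List Int)) (l : List Int) (i : Int) : List Int :=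
  l.filter (fun o => decide ((myd.getD o []).length < 200) &&
    (pvRank (pvFirstFour (opd.getD o [])) == i))

lemma pvFoldA (myd opd : PySem.Dict Int (List Int)) (l : List Int) (acc) :
    l.foldl (pvStepA myd opd) acc =
      (acc.1 ++ pvB myd opd l 0, acc.2.1 ++ pvB myd opd l 1, acc.2.2.1 ++ pvB myd opd l 2,
       acc.2.2.2.1 ++ pvB myd opd l 3, acc.2.2.2.2 ++ pvB myd opd l 4) := by
  induction l generalizing acc with
  | nil => simp [pvB]
  | cons x t ih =>
    rw [List.foldl_cons, pvStepA_eq, ih]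
    by_cases hp : 200 ≤ (myd.getD x []).length
    · simp [pvB, hp, Nat.not_lt.mpr hp]
    · rcases pvRank_cases (pvFirstFour (opd.getD x [])) with h | h | h | h | h <;>
        simp [pvB, pvBump, h, Nat.lt_of_not_le hp, hp]

-- head of the stable sort = Python's min (first extremal element)
lemma pv_head_sorted_eq_min {α κ : Type} [LT κ] [DecidableLT κ] (xs : List α) (key : α → κ) :
    (PySem.List.sorted xs key false).head? = PySem.List.min? xs key := by
  rw [PySem.List.sorted_eq_foldl_insertBy]
  unfold PySem.List.min?
  induction xs using List.reverseRecOn with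
  | nil => rfl
  | append_singleton t x ih =>
    rw [List.foldl_append, List.foldl_append]
    simp only [List.foldl_cons, List.foldl_nil]
    cases hl : List.foldl (fun acc y => PySem.List.insertBy (fun a b => decide (key a < key b)) y acc) [] t with
    | nil =>
      rw [hl] at ih
      rw [← ih]
      simp [PySem.List.insertBy]
    | cons m ms =>
      rw [hl] at ih
      rw [← ih]
      by_cases h : key x < key m <;> simp [PySem.List.insertBy, h]

lemma pvPickA_eq (myd : PySem.Dict Int (List Int)) (move oid : Int) (bucket : List Int)
    (hb : bucket ≠ []) (h200 : ∀ o ∈ bucket, (myd.getD o []).length < 200) :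
    pvPickA myd move oid bucket =
      if oid ∈ bucket then (move, oid)
      else (move, (PySem.List.min? bucket (fun o => (((myd.getD o []).length : Int)))).getD 0) := by
  unfold pvPickA
  by_cases hm : oid ∈ bucket
  · rw [if_pos ⟨(PySem.List.mem_sorted _ _ _ _).mpr hm, h200 _ hm⟩, if_pos hm]
  · rw [if_neg (fun hc => hm ((PySem.List.mem_sorted _ _ _ _).mp hc.1)), if_neg hm]
    have hhead := pv_head_sorted_eq_min bucket (fun o => (((myd.getD o []).length : Int)))
    cases hs : PySem.List.sorted bucket (fun o => (((myd.getD o []).length : Int))) false with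
    | nil => exact absurd ((PySem.List.sorted_eq_nil_iff _ _ _).mp hs) hb
    | cons m ms =>
      rw [hs] at hhead
      rw [← hhead]
      simp [PySem.List.pyGetD_zero]

-- ---------- B-side abstractions ----------
def pvRk (opd : PySem.Dict Int (List Int)) (o : Int) : Int := pvRank (pvFirstFour (opd.getD o []))
def pvPl (myd : PySem.Dict Int (List Int)) (o : Int) : Int := ((myd.getD o []).length : Int)

def pvLexLt (myd opd : PySem.Dict Int (List Int)) (a b : Int) : Bool :=
  pvRk opd a < pvRk opd b || (pvRk opd a == pvRk opd b && pvPl myd a < pvPl myd b)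

lemma pvLexLt_iff (myd opd : PySem.Dict Int (List Int)) (a b : Int) :
    pvLexLt myd opd a b = true ↔
      (pvRk opd a < pvRk opd b ∨ (pvRk opd a = pvRk opd b ∧ pvPl myd a < pvPl myd b)) := by
  simp [pvLexLt]

-- B's best-update on bare ids
def pvGid (myd opd : PySem.Dict Int (List Int)) (b : Option Int) (o : Int) : Option Int :=
  match b with
  | none => some o
  | some m => if pvLexLt myd opd o m then some o else some m

def pvPack (myd opd : PySem.Dict Int (List Int)) (o : Int) : Int × Int × Int :=
  (pvRk opd o, pvPl myd o, o)

-- B's step with the eligibility guard removed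
def pvStepB' (oid : Int) (myd opd : PySem.Dict Int (List Int))
    (acc : Option (Int × Int × Int) × Int) (o : Int) : Option (Int × Int × Int) × Int :=
  ((pvGid myd opd ((acc.1).map (fun t => t.2.2)) o).map (pvPack myd opd),
   if o = oid then pvRk opd o else acc.2)

-- packed-state invariant: pvStepB equals the guarded pvStepB' on packed states
lemma pvStepB_eq (oid : Int) (myd opd : PySem.Dict Int (List Int))
    (b : Option Int) (c : Int) (o : Int) :
    pvStepB oid myd opd (b.map (pvPack myd opd), c) o =
      if 200 ≤ (myd.getD o []).length then (b.map (pvPack myd opd), c)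
      else pvStepB' oid myd opd (b.map (pvPack myd opd), c) o := by
  have hrk : pvRankB (opd.getD o []) = pvRk opd o := pvRankB_eq _
  by_cases hp : 200 ≤ (myd.getD o []).length
  · rw [if_pos hp]
    unfold pvStepB
    rw [if_pos hp]
  · rw [if_neg hp]
    unfold pvStepB pvStepB' pvGid
    rw [if_neg hp]
    cases b with
    | none => simp [pvPack, hrk, pvPl]
    | some m =>
      simp only [Option.map_some, pvPack]
      rw [hrk]
      by_cases hlt : pvLexLt myd opd o m = true
      · have h' := (pvLexLt_iff myd opd o m).mp hlt
        simp only [pvRk, pvPl] at h'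
        rw [if_pos (by simpa [pvRk, pvPl] using h'), if_pos hlt]
        simp [pvPack, pvRk, pvPl]
      · have hlt' : pvLexLt myd opd o m = false := by rwa [Bool.not_eq_true] at hlt
        have h' : ¬ (pvRk opd o < pvRk opd m ∨ (pvRk opd o = pvRk opd m ∧ pvPl myd o < pvPl myd m)) := by
          rw [← pvLexLt_iff]
          simp [hlt']
        rw [if_neg (by simpa [pvRk, pvPl] using h'), if_neg hlt]
        simp [pvPack, pvRk, pvPl]

-- fold of B's guarded step = fold of the unguarded step over the eligible sublist
lemma pvFoldB_filter (oid : Int) (myd opd : PySem.Dict Int (List Int)) (l : List Int)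
    (b : Option Int) (c : Int) :
    l.foldl (pvStepB oid myd opd) (b.map (pvPack myd opd), c) =
      (l.filter (fun o => decide ((myd.getD o []).length < 200))).foldl
        (pvStepB' oid myd opd) (b.map (pvPack myd opd), c) := by
  induction l generalizing b c with
  | nil => simp
  | cons x t ih =>
    rw [List.foldl_cons, pvStepB_eq]
    by_cases hp : 200 ≤ (myd.getD x []).length
    · rw [if_pos hp, List.filter_cons_of_neg (by simpa using hp)]
      exact ih b c
    · rw [if_neg hp, List.filter_cons_of_pos (by simpa using Nat.lt_of_not_le hp)]
      rw [List.foldl_cons]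
      have : pvStepB' oid myd opd (b.map (pvPack myd opd), c) x =
          ((pvGid myd opd b x).map (pvPack myd opd), if x = oid then pvRk opd x else c) := by
        unfold pvStepB'
        congr 1
        cases b <;> simp [pvPack]
      rw [this]
      exact ih _ _
  
-- the unguarded fold splits into the two component folds
lemma pvFoldB'_split (oid : Int) (myd opd : PySem.Dict Int (List Int)) (E : List Int)
    (b : Option Int) (c : Int) :
    E.foldl (pvStepB' oid myd opd) (b.map (pvPack myd opd), c) =
      ((E.foldl (pvGid myd opd) b).map (pvPack myd opd),
       E.foldl (fun c o => if o = oid then pvRk opd o else c) c) := by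
  induction E generalizing b c with
  | nil => rfl
  | cons x t ih =>
    rw [List.foldl_cons, List.foldl_cons, List.foldl_cons]
    have : pvStepB' oid myd opd (b.map (pvPack myd opd), c) x =
        ((pvGid myd opd b x).map (pvPack myd opd), if x = oid then pvRk opd x else c) := by
      unfold pvStepB'
      congr 1
      cases b <;> simp [pvPack]
    rw [this]
    exact ih _ _

-- the cur_rank fold
lemma pvFoldCur (oid : Int) (opd : PySem.Dict Int (List Int)) (E : List Int) (c : Int) :
    E.foldl (fun c o => if o = oid then pvRk opd o else c) c =
      if oid ∈ E then pvRk opd oid else c := by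
  induction E generalizing c with
  | nil => simp
  | cons x t ih =>
    rw [List.foldl_cons, ih]
    by_cases hx : x = oid
    · subst hx
      simp
    · simp [hx, Ne.symm hx, List.mem_cons]

-- the id-level best fold as a structural recursion (first lexicographic minimum)
def pvFlm (myd opd : PySem.Dict Int (List Int)) : Int → List Int → Int
  | a, [] => a
  | a, x :: t => if pvLexLt myd opd x a then pvFlm myd opd x t else pvFlm myd opd a t

lemma pvGid_some (myd opd : PySem.Dict Int (List Int)) (a x : Int) :
    pvGid myd opd (some a) x = some (if pvLexLt myd opd x a then x else a) := by
  by_cases h : pvLexLt myd opd x a = true <;> simp [pvGid, h]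

lemma pvFoldGid (myd opd : PySem.Dict Int (List Int)) (t : List Int) (a : Int) :
    t.foldl (pvGid myd opd) (some a) = some (pvFlm myd opd a t) := by
  induction t generalizing a with
  | nil => rfl
  | cons x u ih =>
    rw [List.foldl_cons, pvGid_some]
    unfold pvFlm
    by_cases h : pvLexLt myd opd x a = true <;> simp [h, ih]

-- order facts about pvLexLt
lemma pvLexLt_self (myd opd : PySem.Dict Int (List Int)) (a : Int) :
    pvLexLt myd opd a a = false := by
  simp [pvLexLt]

lemma pvLexLt_asymm (myd opd : PySem.Dict Int (List Int)) {a b : Int}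
    (h : pvLexLt myd opd a b = true) : pvLexLt myd opd b a = false := by
  rw [pvLexLt_iff] at h
  rw [Bool.eq_false_iff, Ne, pvLexLt_iff]
  omega

lemma pvLexLt_lt_of_le_of_lt (myd opd : PySem.Dict Int (List Int)) {x m a : Int}
    (h1 : pvLexLt myd opd x m = false) (h2 : pvLexLt myd opd x a = true) :
    pvLexLt myd opd m a = true := by
  rw [Bool.eq_false_iff, Ne, pvLexLt_iff] at h1
  rw [pvLexLt_iff] at h2 ⊢
  omega

lemma pvLexLt_lt_of_lt_of_le (myd opd : PySem.Dict Int (List Int)) {m a x : Int}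
    (h1 : pvLexLt myd opd m a = true) (h2 : pvLexLt myd opd x a = false) :
    pvLexLt myd opd m x = true := by
  rw [Bool.eq_false_iff, Ne, pvLexLt_iff] at h2
  rw [pvLexLt_iff] at h1 ⊢
  omega

-- decomposition: pvFlm a t is the FIRST lexicographic minimum of a :: t
lemma pvFlm_split (myd opd : PySem.Dict Int (List Int)) (t : List Int) :
    ∀ a : Int, ∃ t1 t2, a :: t = t1 ++ (pvFlm myd opd a t) :: t2 ∧
      (∀ y ∈ t1, pvLexLt myd opd (pvFlm myd opd a t) y = true) ∧
      (∀ y ∈ a :: t, pvLexLt myd opd y (pvFlm myd opd a t) = false) := by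
  induction t with
  | nil =>
    intro a
    exact ⟨[], [], by simp [pvFlm], by simp, by simp [pvFlm, pvLexLt_self]⟩
  | cons x t ih =>
    intro a
    by_cases hxa : pvLexLt myd opd x a = true
    · have hflm : pvFlm myd opd a (x :: t) = pvFlm myd opd x t := by
        rw [pvFlm, if_pos hxa]
      obtain ⟨t1, t2, hdec, h1, h3⟩ := ih x
      set m := pvFlm myd opd x t with hm
      have hxm : pvLexLt myd opd x m = false := h3 x (List.mem_cons_self)
      have hma : pvLexLt myd opd m a = true := pvLexLt_lt_of_le_of_lt myd opd hxm hxa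
      refine ⟨a :: t1, t2, ?_, ?_, ?_⟩
      · rw [hflm, List.cons_append, ← hdec]
      · intro y hy
        rcases List.mem_cons.mp hy with hya | hyt
        · subst hya; rw [hflm]; exact hma
        · rw [hflm]; exact h1 y hyt
      · intro y hy
        rcases List.mem_cons.mp hy with hya | hyt
        · subst hya; rw [hflm]; exact pvLexLt_asymm myd opd hma
        · rw [hflm]; exact h3 y hyt
    · have hxa' : pvLexLt myd opd x a = false := by
        rwa [Bool.not_eq_true] at hxa
      have hflm0 : pvFlm myd opd a (x :: t) =
          if pvLexLt myd opd x a then pvFlm myd opd x t else pvFlm myd opd a t := by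
        conv_lhs => rw [pvFlm]
      have hflm : pvFlm myd opd a (x :: t) = pvFlm myd opd a t := by
        rw [hflm0, if_neg (by simp [hxa'])]
      obtain ⟨t1, t2, hdec, h1, h3⟩ := ih a
      set m := pvFlm myd opd a t with hm
      cases t1 with
      | nil =>
        have ham : a = m := by simpa using congrArg (fun l => l.head?) hdec
        have hteq : t = t2 := by simpa using congrArg (fun l => l.tail) hdec
        refine ⟨[], x :: t2, ?_, by simp, ?_⟩
        · rw [hflm]; simp [← ham, hteq]
        · intro y hy
          rcases List.mem_cons.mp hy with hya | hyt
          · rw [hflm, hya]; exact h3 a List.mem_cons_self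
          · rcases List.mem_cons.mp hyt with hyx | hyt'
            · subst hyx; rw [hflm, ← ham]; exact hxa'
            · rw [hflm]; exact h3 y (List.mem_cons_of_mem _ hyt')
      | cons z zs =>
        have haz : a = z := by simpa using congrArg (fun l => l.head?) hdec
        have hteq : t = zs ++ m :: t2 := by simpa using congrArg (fun l => l.tail) hdec
        have hma : pvLexLt myd opd m a = true := h1 a (haz ▸ List.mem_cons_self)
        have hmx : pvLexLt myd opd m x = true := pvLexLt_lt_of_lt_of_le myd opd hma hxa'
        refine ⟨a :: x :: zs, t2, ?_, ?_, ?_⟩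
        · rw [hflm]; simp [hteq]
        · intro y hy
          rcases List.mem_cons.mp hy with hya | hyt
          · subst hya; rw [hflm]; exact hma
          · rcases List.mem_cons.mp hyt with hyx | hyz
            · subst hyx; rw [hflm]; exact hmx
            · rw [hflm]; exact h1 y (haz ▸ List.mem_cons_of_mem _ hyz)
        · intro y hy
          rcases List.mem_cons.mp hy with hya | hyt
          · rw [hflm, hya]; exact h3 a List.mem_cons_self
          · rcases List.mem_cons.mp hyt with hyx | hyt'
            · subst hyx; rw [hflm]; exact pvLexLt_asymm myd opd hmx
            · rw [hflm]; exact h3 y (List.mem_cons_of_mem _ hyt')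

-- min? of a split list whose middle strictly beats the prefix and weakly beats the suffix
lemma pvMin_split {α κ : Type} [LT κ] [DecidableLT κ] (key : α → κ) (xs1 xs2 : List α) (m : α)
    (h1 : ∀ y ∈ xs1, key m < key y) (h2 : ∀ y ∈ xs2, ¬ key y < key m) :
    PySem.List.min? (xs1 ++ m :: xs2) key = some m := by
  unfold PySem.List.min?
  set f : Option α → α → Option α := fun acc x => match acc with
    | none => some x
    | some mm => if key x < key mm then some x else some mm with hf
  have keep : ∀ xs : List α, (∀ y ∈ xs, ¬ key y < key m) → xs.foldl f (some m) = some m := by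
    intro xs
    induction xs with
    | nil => intro _; rfl
    | cons x t ih =>
      intro h
      rw [List.foldl_cons, show f (some m) x = some m by simp [hf, h x List.mem_cons_self]]
      exact ih fun y hy => h y (List.mem_cons_of_mem _ hy)
  have main : ∀ (l : List α) (a : α), (∀ y ∈ l, key m < key y) → key m < key a →
      (l ++ m :: xs2).foldl f (some a) = some m := by
    intro l
    induction l with
    | nil =>
      intro a _ hma
      rw [List.nil_append, List.foldl_cons, show f (some a) m = some m by simp [hf, hma]]
      exact keep xs2 h2
    | cons z zs ih =>
      intro a hzs hma
      rw [List.cons_append, List.foldl_cons]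
      by_cases hza : key z < key a
      · rw [show f (some a) z = some z by simp [hf, hza]]
        exact ih z (fun y hy => hzs y (List.mem_cons_of_mem _ hy)) (hzs z List.mem_cons_self)
      · rw [show f (some a) z = some a by simp [hf, hza]]
        exact ih a (fun y hy => hzs y (List.mem_cons_of_mem _ hy)) hma
  cases xs1 with
  | nil =>
    rw [List.nil_append, List.foldl_cons]
    show List.foldl f (some m) xs2 = some m
    exact keep xs2 h2
  | cons z zs =>
    rw [List.cons_append, List.foldl_cons]
    show List.foldl f (some z) (zs ++ m :: xs2) = some m
    exact main zs z (fun y hy => h1 y (List.mem_cons_of_mem _ hy)) (h1 z List.mem_cons_self)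

-- ===== VERDICT (by name: the statement is the Claim_ definition above) =====
theorem strategy_round_2_spec : Claim_equal_strategy_round_2 := by
  intro oid mh oh _
  unfold Spec_strategy_round_2
  simp only [strategy_round_2, strategy_round_2_alt]
  rw [pvFoldA]
  simp only [List.nil_append]
  set myd := PySem.Dict.ofList mh with hmyd
  set opd := PySem.Dict.ofList oh with hopd
  set L := opd.keys with hLdef
  set mv := pvMove (myd.getD oid []) (opd.getD oid []) with hmv
  set E : List Int := L.filter (fun o => decide ((myd.getD o []).length < 200)) with hE
  have hBi : ∀ i : Int, pvB myd opd L i = E.filter (fun o => pvRk opd o == i) := by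
    intro i
    simp only [hE, List.filter_filter, pvB, pvRk]
    exact (List.filter_congr (fun a _ => Bool.and_comm _ _)).symm
  have hfoldB : L.foldl (pvStepB oid myd opd) (none, 5) =
      ((E.foldl (pvGid myd opd) none).map (pvPack myd opd),
       if oid ∈ E then pvRk opd oid else 5) := by
    have h0 : (none : Option (Int × Int × Int)) = (none : Option Int).map (pvPack myd opd) := rfl
    rw [h0, pvFoldB_filter, pvFoldB'_split, pvFoldCur]
  rw [hfoldB]
  by_cases hE0 : E = []
  · have hBnil : ∀ i : Int, pvB myd opd L i = [] := fun i => by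
      rw [hBi i, hE0]; rfl
    simp [hBnil, hE0]
  · obtain ⟨x, t, hEc⟩ := List.exists_cons_of_ne_nil hE0
    have hgid : E.foldl (pvGid myd opd) none = some (pvFlm myd opd x t) := by
      rw [hEc, List.foldl_cons]
      exact pvFoldGid myd opd t x
    set m := pvFlm myd opd x t with hm
    obtain ⟨t1, t2, hdec, h1, h3⟩ := pvFlm_split myd opd t x
    rw [← hm] at hdec h1 h3
    have hEdec : E = t1 ++ m :: t2 := by rw [hEc, hdec]
    have hmE : m ∈ E := by rw [hEdec]; exact List.mem_append_right _ List.mem_cons_self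
    have hminrk : ∀ y ∈ E, pvRk opd m ≤ pvRk opd y := by
      intro y hy
      have := h3 y (by rw [← hEc]; exact hy)
      rw [Bool.eq_false_iff, Ne, pvLexLt_iff] at this
      omega
    have hE200 : ∀ o ∈ E, (myd.getD o []).length < 200 := by
      intro o ho
      have := (List.mem_filter.mp (hE ▸ ho)).2
      simpa using this
    -- buckets of rank below pvRk opd m are empty
    have hBemp : ∀ i : Int, i < pvRk opd m → pvB myd opd L i = [] := by
      intro i hi
      rw [hBi, List.filter_eq_nil_iff]
      intro a haE hai
      rw [beq_iff_eq] at hai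
      have := hminrk a haE
      omega
    -- the bucket at pvRk opd m is nonempty and its Python min is m
    have hfne : E.filter (fun o => pvRk opd o == pvRk opd m) ≠ [] := by
      intro hnil
      have : m ∈ E.filter (fun o => pvRk opd o == pvRk opd m) :=
        List.mem_filter.mpr ⟨hmE, by simp⟩
      rw [hnil] at this
      simp at this
    have hBne : pvB myd opd L (pvRk opd m) ≠ [] := by
      rw [hBi]; exact hfne
    have hbucketdec : E.filter (fun o => pvRk opd o == pvRk opd m) =
        (t1.filter (fun o => pvRk opd o == pvRk opd m)) ++
          m :: (t2.filter (fun o => pvRk opd o == pvRk opd m)) := by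
      rw [hEdec, List.filter_append, List.filter_cons_of_pos (by simp)]
    have hminbucket : PySem.List.min? (E.filter (fun o => pvRk opd o == pvRk opd m))
        (fun o => (((myd.getD o []).length : Int))) = some m := by
      rw [hbucketdec]
      apply pvMin_split
      · intro y hy
        have hyt1 := List.mem_filter.mp hy
        have hlt := h1 y hyt1.1
        rw [pvLexLt_iff] at hlt
        have := (beq_iff_eq.mp hyt1.2)
        simp only [pvPl] at hlt
        omega
      · intro y hy
        have hyt2 := List.mem_filter.mp hy
        have hyE : y ∈ E := by
          rw [hEdec]
          exact List.mem_append_right _ (List.mem_cons_of_mem _ hyt2.1)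
        have hle := h3 y (by rw [← hEc]; exact hyE)
        rw [Bool.eq_false_iff, Ne, pvLexLt_iff] at hle
        have := (beq_iff_eq.mp hyt2.2)
        simp only [pvPl] at hle
        omega
    -- membership of oid in the chosen bucket ↔ B's cur_rank condition
    have hmemiff : (oid ∈ E.filter (fun o => pvRk opd o == pvRk opd m)) ↔
        ((if oid ∈ E then pvRk opd oid else 5) = pvRk opd m) := by
      by_cases hoE : oid ∈ E
      · rw [if_pos hoE, List.mem_filter]
        simp [hoE]
      · rw [if_neg hoE]
        constructor
        · intro h
          exact absurd (List.mem_filter.mp h).1 hoE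
        · intro h
          exfalso
          rcases pvRank_cases (pvFirstFour (opd.getD m [])) with hr | hr | hr | hr | hr <;>
            simp only [pvRk] at h <;> omega
    rw [hgid]
    simp only [Option.map_some, pvPack]
    show _ = (if pvRk opd m < 4 ∧ (if oid ∈ E then pvRk opd oid else 5) = pvRk opd m
              then (mv, oid) else (mv, m))
    have hApick : ∀ hne : E.filter (fun o => pvRk opd o == pvRk opd m) ≠ [],
        pvPickA myd mv oid (E.filter (fun o => pvRk opd o == pvRk opd m)) =
          if oid ∈ E.filter (fun o => pvRk opd o == pvRk opd m) then (mv, oid) else (mv, m) := by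
      intro hne
      rw [pvPickA_eq _ _ _ _ hne (fun o ho => hE200 o (List.mem_filter.mp ho).1), hminbucket]
      by_cases hmem : oid ∈ E.filter (fun o => pvRk opd o == pvRk opd m) <;> simp [hmem]
    rcases pvRank_cases (pvFirstFour (opd.getD m [])) with hr | hr | hr | hr | hr <;>
      rw [show pvRank (pvFirstFour (opd.getD m [])) = pvRk opd m from rfl] at hr
    · rw [if_pos (hr ▸ hBne), show pvB myd opd L 0 = E.filter (fun o => pvRk opd o == pvRk opd m)
        by rw [← hr, hBi], hApick hfne]
      by_cases hmem : oid ∈ E.filter (fun o => pvRk opd o == pvRk opd m)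
      · rw [if_pos hmem, if_pos ⟨by omega, hmemiff.mp hmem⟩]
      · rw [if_neg hmem, if_neg (fun hc => hmem (hmemiff.mpr hc.2))]
    · rw [if_neg (by simp [hBemp 0 (by omega)]), if_pos (hr ▸ hBne),
        show pvB myd opd L 1 = E.filter (fun o => pvRk opd o == pvRk opd m)
        by rw [← hr, hBi], hApick hfne]
      by_cases hmem : oid ∈ E.filter (fun o => pvRk opd o == pvRk opd m)
      · rw [if_pos hmem, if_pos ⟨by omega, hmemiff.mp hmem⟩]
      · rw [if_neg hmem, if_neg (fun hc => hmem (hmemiff.mpr hc.2))]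
    · rw [if_neg (by simp [hBemp 0 (by omega)]), if_neg (by simp [hBemp 1 (by omega)]),
        if_pos (hr ▸ hBne),
        show pvB myd opd L 2 = E.filter (fun o => pvRk opd o == pvRk opd m)
        by rw [← hr, hBi], hApick hfne]
      by_cases hmem : oid ∈ E.filter (fun o => pvRk opd o == pvRk opd m)
      · rw [if_pos hmem, if_pos ⟨by omega, hmemiff.mp hmem⟩]
      · rw [if_neg hmem, if_neg (fun hc => hmem (hmemiff.mpr hc.2))]
    · rw [if_neg (by simp [hBemp 0 (by omega)]), if_neg (by simp [hBemp 1 (by omega)]),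
        if_neg (by simp [hBemp 2 (by omega)]), if_pos (hr ▸ hBne),
        show pvB myd opd L 3 = E.filter (fun o => pvRk opd o == pvRk opd m)
        by rw [← hr, hBi], hApick hfne]
      by_cases hmem : oid ∈ E.filter (fun o => pvRk opd o == pvRk opd m)
      · rw [if_pos hmem, if_pos ⟨by omega, hmemiff.mp hmem⟩]
      · rw [if_neg hmem, if_neg (fun hc => hmem (hmemiff.mpr hc.2))]
    · rw [if_neg (by simp [hBemp 0 (by omega)]), if_neg (by simp [hBemp 1 (by omega)]),
        if_neg (by simp [hBemp 2 (by omega)]), if_neg (by simp [hBemp 3 (by omega)]),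
        if_pos (hr ▸ hBne),
        show pvB myd opd L 4 = E.filter (fun o => pvRk opd o == pvRk opd m)
        by rw [← hr, hBi], hminbucket,
        if_neg (by rintro ⟨h4, _⟩; omega)]
      simp
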